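-- pv_equiv track=rewrite | github.com/pypi-data/pypi-mirror-308 | packages/clabtoolkit/clabtoolkit-0.3.0-py2.py3-none-any.whl/clabtoolkit/bidstools.py | str2entity
-- ===== SOURCE A (Python) =====
-- def str2entity(string: str) -> dict:
--     """
--     Converts a formatted string into a dictionary.
--
--     Parameters
--     ----------
--     string : str
--         String to convert, with the format `key1-value1_key2-value2...suffix.extension`.
--
--     Returns
--     -------
--     dict
--         Dictionary containing the entities extracted from the string.
--
--     Examples
--     --------
--     >>> str2entity("sub-01_ses-M00_acq-3T_dir-AP_run-01_T1w.nii.gz")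
--     Returns: {'sub': '01', 'ses': 'M00', 'acq': '3T', 'dir': 'AP', 'run': '01', 'suffix': 'T1w', 'extension': 'nii.gz'}
--
--     """
--     ent_dict = {}
--     suffix, extension = "", ""
--
--     # Split the string into entities based on underscores.
--     ent_list = string.split("_")
--
--     # Detect suffix and extension
--     for ent in ent_list[:]:
--         if "-" not in ent:
--             # If entity does not contain a '-', it's a suffix or extension.
--             if "." in ent:
--                 # Split suffix and extension parts
--                 suffix, extension = ent.split(".", 1)
--             else:
--                 suffix = ent
--             ent_list.remove(ent)
--
--     # Process the remaining entities
--     for ent in ent_list: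
--         key, value = ent.split("-", 1)  # Split each entity on the first "-"
--         ent_dict[key] = value
--
--     # Add suffix and extension to the dictionary if they were found
--     if suffix:
--         ent_dict["suffix"] = suffix
--     if extension:
--         ent_dict["extension"] = extension
--
--     return ent_dict
-- ===== SOURCE B (Python) =====
-- def str2entity(string: str) -> dict:
--     """Single-pass re-implementation: one traversal of the '_'-separated tokens,
--     no copy-and-remove phase and no second loop."""
--     ent_dict = {}
--     suffix, extension = "", ""
--     for ent in string.split("_"):
--         if "-" in ent:
--             key, value = ent.split("-", 1)
--             ent_dict[key] = value
--         elif "." in ent: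
--             suffix, extension = ent.split(".", 1)
--         else:
--             suffix = ent
--     if suffix:
--         ent_dict["suffix"] = suffix
--     if extension:
--         ent_dict["extension"] = extension
--     return ent_dict
-- ===== Notes on version B (the rewrite author's own statement) =====
-- stated objective: simpler
-- what changed: Replaced A's two-phase scheme (copy the token list, remove suffix/extension tokens from it with list.remove, then a second loop over the remainder) by a single pass that classifies each token directly, so the list copy, the O(n) remove calls and the second loop disappear.
import Mathlib
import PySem

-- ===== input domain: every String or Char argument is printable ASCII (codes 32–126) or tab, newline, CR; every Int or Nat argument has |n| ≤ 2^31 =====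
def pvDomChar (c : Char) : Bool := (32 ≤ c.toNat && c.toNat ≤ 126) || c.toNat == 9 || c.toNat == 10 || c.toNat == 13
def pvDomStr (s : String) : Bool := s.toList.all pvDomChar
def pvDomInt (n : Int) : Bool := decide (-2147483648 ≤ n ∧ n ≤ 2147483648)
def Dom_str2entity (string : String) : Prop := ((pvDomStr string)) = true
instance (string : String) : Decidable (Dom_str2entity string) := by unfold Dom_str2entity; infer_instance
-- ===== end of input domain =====

-- B replaces A's copy-remove detection phase plus second loop by one single pass over the tokens (simpler).

-- shared helper: `a, b = ent.split(sep, 1)` — exact whenever sep occurs in ent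
-- (then the split has exactly two parts, so the fallback is unreachable; both Pythons
-- only call it under that condition).
def pvSplit1 (ent sep : String) : String × String :=
  match PySem.Str.splitMax? ent sep 1 with
  | some (a :: b :: _) => (a, b)
  | _ => ("", "")

-- ===== PORT A =====
-- first loop of A: iterate over a copy of ent_list, removing suffix/extension tokens;
-- `ent_list.remove(ent)` never raises (ent is drawn from the copy), so `.getD` keeps the
-- ValueError branch unreachable.
def aPhase1Step (st : List String × String × String) (ent : String) :
    List String × String × String :=
  if PySem.Str.isIn "-" ent = false then
    let sx := if PySem.Str.isIn "." ent then pvSplit1 ent "." else (ent, st.2.2)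
    ((PySem.List.remove? st.1 ent).getD st.1, sx)
  else st

-- second loop of A: ent_dict[key] = value
def aDictStep (d : PySem.Dict String String) (ent : String) : PySem.Dict String String :=
  let kv := pvSplit1 ent "-"
  d.insert kv.1 kv.2

def str2entity (string : String) : List (String × String) :=
  let entList := (PySem.Str.split? string "_").getD []
  let st := entList.foldl aPhase1Step (entList, "", "")
  let d := st.1.foldl aDictStep PySem.Dict.empty
  let d := if st.2.1 = "" then d else d.insert "suffix" st.2.1
  let d := if st.2.2 = "" then d else d.insert "extension" st.2.2
  d.items

-- ===== PORT B =====
-- B's single loop: classify each token directly (key-value / suffix.extension / suffix).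
def bStep (st : PySem.Dict String String × String × String) (ent : String) :
    PySem.Dict String String × String × String :=
  if PySem.Str.isIn "-" ent then
    let kv := pvSplit1 ent "-"
    (st.1.insert kv.1 kv.2, st.2)
  else if PySem.Str.isIn "." ent then
    (st.1, pvSplit1 ent ".")
  else
    (st.1, ent, st.2.2)

def str2entity_alt (string : String) : List (String × String) :=
  let st := ((PySem.Str.split? string "_").getD []).foldl bStep (PySem.Dict.empty, "", "")
  let d := if st.2.1 = "" then st.1 else st.1.insert "suffix" st.2.1
  let d := if st.2.2 = "" then d else d.insert "extension" st.2.2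
  d.items

-- ===== PRECONDITION & SPEC =====
def Spec_str2entity (string : String) (out : List (String × String)) : Prop := out = str2entity_alt string
instance (string : String) (out : List (String × String)) : Decidable (Spec_str2entity string out) := by unfold Spec_str2entity; infer_instance

-- ===== CLAIM (what is proved, stated in full; the proofs are below) =====
def Claim_equal_str2entity : Prop := ∀ (string : String), Dom_str2entity string → Spec_str2entity string (str2entity string)

-- ===== LEMMAS AND PROOFS =====

-- the suffix/extension state update shared by both loops (skips the key-value tokens)
def sxSkip (sx : String × String) (ent : String) : String × String :=
  if PySem.Str.isIn "-" ent then sx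
  else if PySem.Str.isIn "." ent then pvSplit1 ent "." else (ent, sx.2)

lemma remove?_append_not_mem (acc : List String) (e : String) (rest : List String)
    (h : e ∉ acc) : PySem.List.remove? (acc ++ e :: rest) e = some (acc ++ rest) := by
  induction acc with
  | nil => simp
  | cons a acc ih =>
      have hne : a ≠ e := by rintro rfl; exact h (List.mem_cons_self)
      rw [List.cons_append, PySem.List.remove?_cons_of_ne _ hne,
        ih (fun hm => h (List.mem_cons_of_mem _ hm)), Option.map_some, List.cons_append]

-- A's first loop, characterised: the list becomes the key-value tokens (in order), the
-- suffix/extension state is the sxSkip-fold over the tokens.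
lemma phase1_spec : ∀ (rest acc : List String) (s x : String),
    (∀ a ∈ acc, PySem.Str.isIn "-" a = true) →
    rest.foldl aPhase1Step (acc ++ rest, s, x)
      = (acc ++ rest.filter (fun e => PySem.Str.isIn "-" e), rest.foldl sxSkip (s, x)) := by
  intro rest
  induction rest with
  | nil => intro acc s x _; simp
  | cons e rest ih =>
      intro acc s x hacc
      by_cases hd : PySem.Str.isIn "-" e = true
      · have hd' : PySem.Chars.isIn ['-'] e.toList = true := by simpa using hd
        have h1 : aPhase1Step (acc ++ e :: rest, s, x) e = ((acc ++ [e]) ++ rest, s, x) := by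
          simp [aPhase1Step, hd']
        have h2 : sxSkip (s, x) e = (s, x) := by simp [sxSkip, hd']
        rw [List.foldl_cons, List.foldl_cons, h1, h2,
          ih (acc ++ [e]) s x (by
            intro a ha
            rcases List.mem_append.1 ha with hm | hm
            · exact hacc a hm
            · simpa [List.mem_singleton.1 hm] using hd)]
        simp [hd']
      · have hd' : PySem.Chars.isIn ['-'] e.toList = false := by
          simpa using eq_false_of_ne_true hd
        have hmem : e ∉ acc := fun hm => hd (hacc e hm)
        have h1 : aPhase1Step (acc ++ e :: rest, s, x) e = (acc ++ rest, sxSkip (s, x) e) := by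
          simp [aPhase1Step, sxSkip, hd', remove?_append_not_mem acc e rest hmem]
        rw [List.foldl_cons, List.foldl_cons, h1]
        rcases hsx : sxSkip (s, x) e with ⟨s', x'⟩
        rw [ih acc s' x' hacc]
        simp [hd']

-- B's single loop, decomposed into A's two folds.
lemma bfold_spec : ∀ (L : List String) (d : PySem.Dict String String) (s x : String),
    L.foldl bStep (d, s, x)
      = ((L.filter (fun e => PySem.Str.isIn "-" e)).foldl aDictStep d,
         L.foldl sxSkip (s, x)) := by
  intro L
  induction L with
  | nil => intro d s x; simp
  | cons e L ih =>
      intro d s x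
      by_cases hd : PySem.Str.isIn "-" e = true
      · have hd' : PySem.Chars.isIn ['-'] e.toList = true := by simpa using hd
        have h1 : bStep (d, s, x) e = (aDictStep d e, s, x) := by
          simp [bStep, aDictStep, hd']
        have h2 : sxSkip (s, x) e = (s, x) := by simp [sxSkip, hd']
        rw [List.foldl_cons, List.foldl_cons, h1, h2, ih]
        simp [hd']
      · have hd' : PySem.Chars.isIn ['-'] e.toList = false := by
          simpa using eq_false_of_ne_true hd
        have h1 : bStep (d, s, x) e = (d, sxSkip (s, x) e) := by
          simp [bStep, sxSkip, hd']
          split <;> rfl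
        rw [List.foldl_cons, List.foldl_cons, h1]
        rcases hsx : sxSkip (s, x) e with ⟨s', x'⟩
        rw [ih]
        simp [hd']

-- ===== VERDICT (by name: the statement is the Claim_ definition above) =====
theorem str2entity_spec : Claim_equal_str2entity := by
  intro string _
  unfold Spec_str2entity
  have hA := phase1_spec ((PySem.Str.split? string "_").getD []) [] "" "" (by intro a ha; simp at ha)
  rw [List.nil_append] at hA
  simp only [str2entity, str2entity_alt, bfold_spec, hA, List.nil_append]
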